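-- pv_equiv track=rewrite | github.com/goyalper/cube | solver/minimal_views.py | optimize_move_sequence
-- ===== SOURCE A (Python) =====
-- def optimize_move_sequence(moves):
--     """
--     Optimize move sequence by:
--     1. Combining consecutive same moves (R R R = R')
--     2. Removing opposite moves (R R' = nothing)
--     3. Simplifying double moves
--     """
--     if not moves:
--         return []
--
--     optimized = []
--     i = 0
--
--     while i < len(moves):
--         current_move = moves[i]
--         base_move = current_move.replace("'", "").replace("2", "")
--         count = 0
--
--         # Count consecutive moves of the same face
--         while i < len(moves) and moves[i].replace("'", "").replace("2", "") == base_move: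
--             move = moves[i]
--             if move.endswith("'"):
--                 count -= 1
--             elif move.endswith("2"):
--                 count += 2
--             else:
--                 count += 1
--             i += 1
--
--         # Normalize count to 0-3 range
--         count = count % 4
--
--         # Add appropriate move based on count
--         if count == 1:
--             optimized.append(base_move)
--         elif count == 2:
--             optimized.append(base_move + "2")
--         elif count == 3:
--             optimized.append(base_move + "'")
--         # count == 0 means no move (moves cancel out)
--
--     return optimized
-- ===== SOURCE B (Python) =====
-- def optimize_move_sequence(moves):
--     # Divide-and-conquer: recursively group each half into (base, total-delta) runs,
--     # then glue the halves, merging the boundary runs if they share a base face.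
--     def base(m):
--         return m.replace("'", "").replace("2", "")
--
--     def delta(m):
--         return -1 if m.endswith("'") else (2 if m.endswith("2") else 1)
--
--     def groups(lo, hi):
--         if hi - lo == 1:
--             return [(base(moves[lo]), delta(moves[lo]))]
--         mid = (lo + hi) // 2
--         left, right = groups(lo, mid), groups(mid, hi)
--         if left[-1][0] == right[0][0]:
--             return left[:-1] + [(left[-1][0], left[-1][1] + right[0][1])] + right[1:]
--         return left + right
--
--     if not moves:
--         return []
--     out = []
--     for b, t in groups(0, len(moves)):
--         c = t % 4
--         if c == 1:
--             out.append(b)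
--         elif c == 2:
--             out.append(b + "2")
--         elif c == 3:
--             out.append(b + "'")
--     return out
-- ===== Notes on version B (the rewrite author's own statement) =====
-- stated objective: alternative
-- what changed: Replaced A's nested index while-loops by a divide-and-conquer recursion: each half of the list is independently reduced to (base, total-delta) runs and the two run lists are glued, merging the boundary runs when they share a base face, followed by an emission pass from total mod 4.
import Mathlib
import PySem

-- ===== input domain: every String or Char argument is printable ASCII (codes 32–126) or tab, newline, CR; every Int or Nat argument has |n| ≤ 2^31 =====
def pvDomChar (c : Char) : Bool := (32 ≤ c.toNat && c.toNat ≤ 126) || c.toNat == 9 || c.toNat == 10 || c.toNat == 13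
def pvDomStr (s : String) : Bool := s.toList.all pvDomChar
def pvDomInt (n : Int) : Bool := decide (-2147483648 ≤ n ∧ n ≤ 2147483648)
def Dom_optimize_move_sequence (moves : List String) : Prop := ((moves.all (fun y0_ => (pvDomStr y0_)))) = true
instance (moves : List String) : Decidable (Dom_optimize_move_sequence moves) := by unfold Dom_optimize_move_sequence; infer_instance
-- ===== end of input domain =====

-- B replaces A's nested index while-loops by divide-and-conquer grouping into
-- (base, total-delta) runs glued at the half boundary (objective: alternative; return value only).

-- shared helpers: both Pythons compute the base face and the turn delta by these exact expressions
def pvBase (m : String) : String := PySem.Str.replace (PySem.Str.replace m "'" "") "2" ""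

def pvDelta (m : String) : Int :=
  if PySem.Str.endswith m "'" then -1 else if PySem.Str.endswith m "2" then 2 else 1

-- ===== PORT A =====
-- inner while: count consecutive moves of the same face, returning the count and the remaining cursor
def aCount (base : String) : List String → Int → Int × List String
  | [], c => (c, [])
  | m :: ms, c => if pvBase m == base then aCount base ms (c + pvDelta m) else (c, m :: ms)

-- termination fact for the outer loop (the inner while never moves the cursor backwards)
theorem aCount_len (base : String) : ∀ (ms : List String) (c : Int),
    (aCount base ms c).2.length ≤ ms.length := by
  intro ms
  induction ms with
  | nil => intro c; simp [aCount]
  | cons m ms ih =>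
    intro c
    by_cases h : (pvBase m == base) = true
    · simp only [aCount, h, if_true]
      exact le_trans (ih _) (by simp)
    · simp [aCount, h]

-- outer while over the cursor (the first inner iteration always consumes moves[i], whose base is base_move)
def aLoop (rest : List String) : List String :=
  match rest with
  | [] => []
  | m :: ms =>
    let base := pvBase m
    let p := aCount base ms (pvDelta m)
    let c := PySem.Int.mod p.1 4
    (if c = 1 then [base] else if c = 2 then [base ++ "2"] else if c = 3 then [base ++ "'"] else [])
      ++ aLoop p.2
termination_by rest.length
decreasing_by
  have := aCount_len (pvBase m) ms (pvDelta m)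
  simp only [List.length_cons]
  omega

def optimize_move_sequence (moves : List String) : List String :=
  if moves = [] then [] else aLoop moves

-- ===== PORT B =====
-- glue of two run lists: merge the boundary runs when they share a base
-- (Source B: left[:-1] + [(b, lt+rt)] + right[1:] when left[-1][0] == right[0][0], else left + right)
def glue (L R : List (String × Int)) : List (String × Int) :=
  match L.getLast?, R with
  | some (b, t), (b2, t2) :: rt => if b == b2 then L.dropLast ++ (b, t + t2) :: rt else L ++ R
  | _, _ => L ++ R

-- groups(lo, hi) recursing on the sublist moves[lo:hi]: singleton base case, split at the midpoint
def gGroups : List String → List (String × Int)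
  | [] => []
  | [m] => [(pvBase m, pvDelta m)]
  | m :: m' :: ms =>
    let xs := m :: m' :: ms
    let mid := xs.length / 2
    glue (gGroups (xs.take mid)) (gGroups (xs.drop mid))
termination_by xs => xs.length
decreasing_by
  · simp only [List.length_take, List.length_cons]; omega
  · simp only [List.length_drop, List.length_cons]; omega

-- emission pass: one move per run from total % 4
def bEmit (g : String × Int) : List String :=
  let c := PySem.Int.mod g.2 4
  if c = 1 then [g.1] else if c = 2 then [g.1 ++ "2"] else if c = 3 then [g.1 ++ "'"] else []

def optimize_move_sequence_alt (moves : List String) : List String :=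
  if moves = [] then [] else (gGroups moves).flatMap bEmit

-- ===== PRECONDITION & SPEC =====
def Spec_optimize_move_sequence (moves : List String) (out : List String) : Prop := out = optimize_move_sequence_alt moves
instance (moves : List String) (out : List String) : Decidable (Spec_optimize_move_sequence moves out) := by unfold Spec_optimize_move_sequence; infer_instance

-- ===== CLAIM =====
def Claim_equal_optimize_move_sequence : Prop := ∀ (moves : List String), Dom_optimize_move_sequence moves → Spec_optimize_move_sequence moves (optimize_move_sequence moves)

-- ===== LEMMAS AND PROOFS =====

-- proof-side reference grouping: the left-to-right adjacency runs, built back-to-front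
def bStep (base : String) (d : Int) (gs : List (String × Int)) : List (String × Int) :=
  match gs with
  | (b, t) :: rest => if b == base then (b, t + d) :: rest else (base, d) :: (b, t) :: rest
  | [] => [(base, d)]

def bGroups : List String → List (String × Int)
  | [] => []
  | m :: ms => bStep (pvBase m) (pvDelta m) (bGroups ms)

-- the run counter's accumulator is additive, and the remaining cursor ignores it
theorem aCount_shift (base : String) : ∀ (ms : List String) (c : Int),
    aCount base ms c = (c + (aCount base ms 0).1, (aCount base ms 0).2) := by
  intro ms
  induction ms with
  | nil => intro c; simp [aCount]
  | cons m ms ih =>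
    intro c
    by_cases h : (pvBase m == base) = true
    · simp only [aCount, h, if_true]
      rw [ih (c + pvDelta m), ih (0 + pvDelta m)]
      simp [Prod.ext_iff]; ring
    · simp [aCount, h]

-- a step always leaves its own key at the front
theorem bStep_head (k : String) (d : Int) (gs : List (String × Int)) :
    ∃ t rest, bStep k d gs = (k, t) :: rest := by
  match gs with
  | [] => exact ⟨d, [], rfl⟩
  | (b, t) :: r =>
    by_cases h : (b == k) = true
    · exact ⟨t + d, r, by simp [bStep, eq_of_beq h]⟩
    · exact ⟨d, (b, t) :: r, by simp [bStep, h]⟩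

theorem bGroups_ne_nil (ms : List String) (h : ms ≠ []) : bGroups ms ≠ [] := by
  match ms with
  | [] => exact absurd rfl h
  | m :: ms =>
    obtain ⟨t, rest, he⟩ := bStep_head (pvBase m) (pvDelta m) (bGroups ms)
    simp [bGroups, he]

-- the key correspondence: one reversed-merge step over the grouped suffix equals
-- peeling the run from the front with A's inner while
theorem bStep_aCount (base : String) : ∀ (ms : List String) (c : Int),
    bStep base c (bGroups ms) = (base, (aCount base ms c).1) :: bGroups (aCount base ms c).2 := by
  intro ms
  induction ms with
  | nil => intro c; simp [bStep, bGroups, aCount]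
  | cons m ms ih =>
    intro c
    by_cases h : (pvBase m == base) = true
    · have hb : pvBase m = base := eq_of_beq h
      simp only [bGroups, hb, aCount]
      rw [if_pos (by simp)]
      rw [ih (pvDelta m)]
      simp only [bStep, BEq.rfl, if_true]
      rw [aCount_shift base ms (c + pvDelta m), aCount_shift base ms (pvDelta m)]
      simp [Prod.ext_iff]; ring
    · obtain ⟨t, rest, he⟩ := bStep_head (pvBase m) (pvDelta m) (bGroups ms)
      have hg : bGroups (m :: ms) = (pvBase m, t) :: rest := he
      rw [aCount, if_neg (by simpa using h)]
      rw [hg]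
      have hf : (pvBase m == base) = false := by simpa using h
      simp only [bStep, hf]
      simp only [if_false, Bool.false_eq_true]

theorem aLoop_eq_bGroups : ∀ (rest : List String), aLoop rest = (bGroups rest).flatMap bEmit := by
  intro rest
  induction rest using aLoop.induct with
  | case1 => simp [aLoop, bGroups]
  | case2 m ms base p ih =>
    rw [aLoop]
    rw [show bGroups (m :: ms) = bStep (pvBase m) (pvDelta m) (bGroups ms) from rfl,
        bStep_aCount (pvBase m) ms (pvDelta m)]
    simp only [List.flatMap_cons]
    rw [ih]
    rfl

-- glue distributes over a cons whose tail is nonempty (the boundary lies deeper)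
theorem glue_cons (x : String × Int) (L R : List (String × Int)) (hL : L ≠ []) :
    glue (x :: L) R = x :: glue L R := by
  match R with
  | [] =>
    match hl : L.getLast? with
    | some p => simp [glue]
    | none => exact absurd (List.getLast?_eq_none_iff.mp hl) hL
  | (b2, t2) :: rt =>
    match hl : L.getLast? with
    | none => exact absurd (List.getLast?_eq_none_iff.mp hl) hL
    | some (b, t) =>
      have hx : (x :: L).getLast? = some (b, t) := by
        rw [List.getLast?_cons, hl]; cases L <;> simp_all
      by_cases h : b = b2
      · simp [glue, hx, hl, h, List.dropLast_cons_of_ne_nil hL]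
      · simp [glue, hx, hl, h]

-- a front merge commutes with gluing on the right of a nonempty left part
theorem bStep_glue (b : String) (d : Int) (L R : List (String × Int))
    (hL : L ≠ []) (hR : R ≠ []) :
    bStep b d (glue L R) = glue (bStep b d L) R := by
  match L, R with
  | [], _ => exact absurd rfl hL
  | _, [] => exact absurd rfl hR
  | [(a, t)], (b2, t2) :: rt =>
    by_cases hab : a = b
    · subst hab
      by_cases h2 : a = b2
      · subst h2
        simp only [glue, bStep, List.getLast?_singleton, beq_self_eq_true, if_true,
          List.dropLast, List.nil_append]
        simp [Prod.ext_iff]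
        ring
      · simp [glue, bStep, h2]
    · by_cases h2 : a = b2
      · subst h2
        simp only [glue, List.getLast?_singleton, beq_self_eq_true, if_true,
          List.dropLast, List.nil_append]
        have hab' : (a == b) = false := by simp [hab]
        simp only [bStep, hab', Bool.false_eq_true, if_false]
        simp
      · have h2' : (a == b2) = false := by simp [h2]
        simp only [glue, List.getLast?_singleton, h2', Bool.false_eq_true, if_false,
          List.singleton_append]
        have hab' : (a == b) = false := by simp [hab]
        simp only [bStep, hab', Bool.false_eq_true, if_false]
        simp [h2']
  | (a, t) :: p :: L', (b2, t2) :: rt =>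
    rw [glue_cons (a, t) (p :: L') _ (by simp)]
    by_cases hab : (a == b) = true
    · simp only [bStep, hab, if_true]
      rw [glue_cons (a, t + d) (p :: L') _ (by simp)]
    · simp only [bStep, hab, Bool.false_eq_true, if_false]
      rw [glue_cons (b, d) ((a, t) :: p :: L') _ (by simp),
          glue_cons (a, t) (p :: L') _ (by simp)]

-- the reference grouping of a concatenation is the glue of the two groupings
theorem bGroups_append : ∀ (xs ys : List String), xs ≠ [] → ys ≠ [] →
    bGroups (xs ++ ys) = glue (bGroups xs) (bGroups ys) := by
  intro xs
  induction xs with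
  | nil => intro ys h _; exact absurd rfl h
  | cons m xs ih =>
    intro ys _ hy
    match xs with
    | [] =>
      -- singleton left part: glue merges at its single pair iff bStep does
      show bStep (pvBase m) (pvDelta m) (bGroups ys) = glue [(pvBase m, pvDelta m)] (bGroups ys)
      match hg : bGroups ys with
      | [] => exact absurd hg (bGroups_ne_nil ys hy)
      | (b2, t2) :: rt =>
        by_cases h : b2 = pvBase m
        · subst h
          simp [bStep, glue, Prod.ext_iff]
          ring
        · have h1 : (b2 == pvBase m) = false := by simp [h]
          have h2 : (pvBase m == b2) = false := by simp [Ne.symm h]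
          simp [bStep, glue, h1, h2]
    | x :: xs' =>
      have hx : (x :: xs') ≠ [] := by simp
      show bStep (pvBase m) (pvDelta m) (bGroups (x :: xs' ++ ys))
          = glue (bStep (pvBase m) (pvDelta m) (bGroups (x :: xs'))) (bGroups ys)
      rw [ih ys hx hy, bStep_glue _ _ _ _ (bGroups_ne_nil _ hx) (bGroups_ne_nil _ hy)]

-- the divide-and-conquer grouping agrees with the reference grouping
theorem gGroups_eq_bGroups : ∀ (xs : List String), gGroups xs = bGroups xs := by
  intro xs
  induction xs using gGroups.induct with
  | case1 => simp [gGroups, bGroups]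
  | case2 m => simp [gGroups, bGroups, bStep]
  | case3 m m' ms xs mid ih1 ih2 =>
    rw [gGroups]
    have hlen : xs.length = ms.length + 2 := by simp [xs]
    rw [ih1, ih2]
    rw [← bGroups_append (xs.take mid) (xs.drop mid)
        (by intro h; have h2 := congrArg List.length h
            simp only [List.length_take, List.length_nil] at h2
            simp only [mid, hlen] at h2 ⊢; omega)
        (by intro h; have h2 := congrArg List.length h
            simp only [List.length_drop, List.length_nil] at h2
            simp only [mid, hlen] at h2 ⊢; omega)]
    rw [List.take_append_drop]

-- ===== VERDICT =====
theorem optimize_move_sequence_spec : Claim_equal_optimize_move_sequence := by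
  intro moves _
  unfold Spec_optimize_move_sequence optimize_move_sequence optimize_move_sequence_alt
  by_cases h : moves = []
  · simp [h]
  · rw [if_neg h, if_neg h, aLoop_eq_bGroups, gGroups_eq_bGroups]
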